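-- pv_equiv track=rewrite | github.com/4nglp/py | td_3/ex_1.py | sum_occ
-- ===== SOURCE A (Python) =====
-- def sum_occ(list, n):
--     if not list:
--         return 0
--     else:
--         occ = 0
--         if list[0] % 10 == n:
--             occ = occ + 1
--         return occ + sum_occ(list[1:], n)
-- ===== SOURCE B (Python) =====
-- def sum_occ(list, n):
--     occ = 0
--     for x in list:
--         if x % 10 == n:
--             occ += 1
--     return occ
-- ===== Notes on version B (the rewrite author's own statement) =====
-- stated objective: simpler
-- what changed: Replaces the recursion over list[1:] with a single iterative pass accumulating a counter.
import Mathlib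
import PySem

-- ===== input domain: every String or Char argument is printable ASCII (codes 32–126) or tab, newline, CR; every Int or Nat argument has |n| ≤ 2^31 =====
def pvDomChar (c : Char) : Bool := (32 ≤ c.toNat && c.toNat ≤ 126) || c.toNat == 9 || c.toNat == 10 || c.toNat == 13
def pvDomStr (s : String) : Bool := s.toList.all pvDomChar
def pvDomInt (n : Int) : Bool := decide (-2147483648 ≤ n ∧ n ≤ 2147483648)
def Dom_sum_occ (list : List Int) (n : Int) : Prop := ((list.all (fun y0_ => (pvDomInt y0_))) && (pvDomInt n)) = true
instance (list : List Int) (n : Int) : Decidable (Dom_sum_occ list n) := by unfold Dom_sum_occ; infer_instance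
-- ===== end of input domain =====

-- B replaces A's recursion over list[1:] with a single iterative counting pass (simpler, avoids the slice copies).

-- ===== PORT A =====
def sum_occ (list : List Int) (n : Int) : Int :=
  match list with
  | [] => 0
  | x :: rest =>
      let occ : Int := if PySem.Int.mod x 10 == n then 1 else 0
      occ + sum_occ rest n

-- ===== PORT B =====
def sum_occ_alt (list : List Int) (n : Int) : Int :=
  list.foldl (fun occ x => if PySem.Int.mod x 10 == n then occ + 1 else occ) 0

-- ===== PRECONDITION & SPEC =====
def Spec_sum_occ (list : List Int) (n : Int) (out : Int) : Prop := out = sum_occ_alt list n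
instance (list : List Int) (n : Int) (out : Int) : Decidable (Spec_sum_occ list n out) := by unfold Spec_sum_occ; infer_instance

-- ===== CLAIM =====
def Claim_equal_sum_occ : Prop := ∀ (list : List Int) (n : Int), Dom_sum_occ list n → Spec_sum_occ list n (sum_occ list n)

-- ===== LEMMAS AND PROOFS =====
theorem sum_occ_alt_acc (list : List Int) (n acc : Int) :
    list.foldl (fun occ x => if PySem.Int.mod x 10 == n then occ + 1 else occ) acc
      = acc + sum_occ list n := by
  induction list generalizing acc with
  | nil => simp [sum_occ]
  | cons x rest ih =>
      simp only [List.foldl, sum_occ]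
      rw [ih]
      split <;> ring

-- ===== VERDICT =====
theorem sum_occ_spec : Claim_equal_sum_occ := by
  intro list n _
  unfold Spec_sum_occ sum_occ_alt
  rw [sum_occ_alt_acc]
  ring
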